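-- pv_equiv track=rewrite | github.com/jacobkj314/online_itsl | Aksenova.py | front_harmony
-- ===== SOURCE A (Python) =====
-- def front_harmony(string):
--     """
--     Tells if a string is well-formed according to rules
--     of Finnish backness harmony.
--     """
--     front_class, back_class = "AOy", "aou"
--     front, back = False, False
--
--     for v in front_class + back_class:
--         if v in string:
--             front = True if v in front_class else front
--             back = True if v in back_class else back
--
--     return not (front and back)
-- ===== SOURCE B (Python) =====
-- def front_harmony(string):
--     """
--     Tells if a string is well-formed according to rules
--     of Finnish backness harmony.
--     """
--     front, back = False, False
--     for c in string:
--         if c in "AOy":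
--             front = True
--         elif c in "aou":
--             back = True
--     return not (front and back)
-- ===== Notes on version B (the rewrite author's own statement) =====
-- stated objective: simpler
-- what changed: B makes one pass over the input's characters, flagging front/back as each character falls in a vowel class, instead of scanning the whole string once per vowel of the two class alphabets.
import Mathlib
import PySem

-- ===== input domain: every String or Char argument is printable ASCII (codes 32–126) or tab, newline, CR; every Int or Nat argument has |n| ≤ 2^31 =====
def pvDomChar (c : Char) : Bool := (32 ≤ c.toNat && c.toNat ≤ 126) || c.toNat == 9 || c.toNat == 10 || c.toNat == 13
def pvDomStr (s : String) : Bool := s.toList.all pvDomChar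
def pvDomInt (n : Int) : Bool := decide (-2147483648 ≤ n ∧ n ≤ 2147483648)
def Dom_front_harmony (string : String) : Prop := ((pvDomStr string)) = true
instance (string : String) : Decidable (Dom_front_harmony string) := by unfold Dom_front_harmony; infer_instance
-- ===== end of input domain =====

-- B replaces A's scan of the string once per vowel of the two class alphabets by a single
-- pass over the input's characters that flags front/back class membership (objective: simpler).

-- ===== PORT A =====
def front_harmony (string : String) : Bool :=
  let front_class := "AOy"
  let back_class := "aou"
  let st := (front_class ++ back_class).toList.foldl
    (fun (st : Bool × Bool) v =>
      if PySem.Str.isIn (String.ofList [v]) string then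
        ((if PySem.Str.isIn (String.ofList [v]) front_class then true else st.1),
         (if PySem.Str.isIn (String.ofList [v]) back_class then true else st.2))
      else st) (false, false)
  !(st.1 && st.2)

-- ===== PORT B =====
def front_harmony_alt (string : String) : Bool :=
  let st := string.toList.foldl
    (fun (st : Bool × Bool) c =>
      if PySem.Str.isIn (String.ofList [c]) "AOy" then (true, st.2)
      else if PySem.Str.isIn (String.ofList [c]) "aou" then (st.1, true)
      else st) (false, false)
  !(st.1 && st.2)

-- ===== PRECONDITION & SPEC =====
def Spec_front_harmony (string : String) (out : Bool) : Prop := out = front_harmony_alt string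
instance (string : String) (out : Bool) : Decidable (Spec_front_harmony string out) := by unfold Spec_front_harmony; infer_instance

-- ===== CLAIM (what is proved, stated in full; the proofs are below) =====
def Claim_equal_front_harmony : Prop := ∀ (string : String), Dom_front_harmony string → Spec_front_harmony string (front_harmony string)

-- ===== LEMMAS AND PROOFS =====

-- `c in s` for a single character c is membership of c among s's characters
theorem isIn_single (c : Char) (s : String) :
    PySem.Str.isIn (String.ofList [c]) s = s.toList.contains c := by
  rw [Bool.eq_iff_iff, PySem.Str.isIn_iff_infix]
  rw [String.toList_ofList]
  constructor
  · intro h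
    have := h.sublist
    simpa using this.subset (List.mem_singleton_self c)
  · intro h
    obtain ⟨p, q, hpq⟩ := List.append_of_mem (by simpa using h)
    exact ⟨p, q, by simp [hpq]⟩

-- B's fold invariant
theorem foldB (l : List Char) (f b : Bool) :
    l.foldl (fun (st : Bool × Bool) c =>
      if PySem.Str.isIn (String.ofList [c]) "AOy" then (true, st.2)
      else if PySem.Str.isIn (String.ofList [c]) "aou" then (st.1, true)
      else st) (f, b)
    = (f || l.any (fun c => ['A','O','y'].contains c),
       b || l.any (fun c => !(['A','O','y'].contains c) && ['a','o','u'].contains c)) := by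
  induction l generalizing f b with
  | nil => simp
  | cons c t ih =>
    have e1 : "AOy".toList = ['A','O','y'] := by decide
    have e2 : "aou".toList = ['a','o','u'] := by decide
    have hA : PySem.Str.isIn (String.ofList [c]) "AOy" = (['A','O','y'] : List Char).contains c := by
      rw [isIn_single, e1]
    have hB : PySem.Str.isIn (String.ofList [c]) "aou" = (['a','o','u'] : List Char).contains c := by
      rw [isIn_single, e2]
    simp only [List.foldl_cons, List.any_cons, hA, hB]
    by_cases h1 : (['A','O','y'] : List Char).contains c = true
    · rw [if_pos h1, ih]
      have hc : c = 'A' ∨ c = 'O' ∨ c = 'y' := by simpa using h1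
      rcases hc with h | h | h <;> subst h <;> simp
    · by_cases h2 : (['a','o','u'] : List Char).contains c = true
      · rw [if_neg h1, if_pos h2, ih]
        have hc : c = 'a' ∨ c = 'o' ∨ c = 'u' := by simpa using h2
        rcases hc with h | h | h <;> subst h <;> simp
      · rw [if_neg h1, if_neg h2, ih]
        simp at h1 h2
        simp [h1, h2]

-- the two vowel-class `any` tests, as disjunctions of per-vowel containment
theorem anyFront (l : List Char) :
    (l.any fun c => (['A','O','y'] : List Char).contains c)
      = (l.contains 'A' || l.contains 'O' || l.contains 'y') := by
  rw [Bool.eq_iff_iff]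
  simp only [List.any_eq_true, Bool.or_eq_true, List.contains_iff_mem, List.mem_cons,
    List.not_mem_nil, or_false]
  constructor
  · rintro ⟨c, hc, h | h | h⟩ <;> subst h <;> tauto
  · rintro ((h | h) | h) <;> exact ⟨_, h, by tauto⟩

theorem anyBack (l : List Char) :
    (l.any fun c => !(['A','O','y'] : List Char).contains c && (['a','o','u'] : List Char).contains c)
      = (l.contains 'a' || l.contains 'o' || l.contains 'u') := by
  rw [Bool.eq_iff_iff]
  simp only [List.any_eq_true, Bool.and_eq_true, Bool.or_eq_true, Bool.not_eq_true',
    List.contains_iff_mem, List.mem_cons, List.not_mem_nil, or_false]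
  constructor
  · rintro ⟨c, hc, _, h | h | h⟩ <;> subst h <;> tauto
  · rintro ((h | h) | h) <;> exact ⟨_, h, by decide, by decide⟩

-- ===== VERDICT (by name: the statement is the Claim_ definition above) =====
theorem front_harmony_spec : Claim_equal_front_harmony := by
  intro s _
  unfold Spec_front_harmony front_harmony front_harmony_alt
  dsimp only
  rw [foldB]
  have e : ("AOy" ++ "aou").toList = ['A','O','y','a','o','u'] := by decide
  rw [e]
  simp only [List.foldl_cons, List.foldl_nil]
  rw [isIn_single 'A' s, isIn_single 'O' s, isIn_single 'y' s,
      isIn_single 'a' s, isIn_single 'o' s, isIn_single 'u' s]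
  have cAf : PySem.Str.isIn (String.ofList ['A']) "AOy" = true := by decide
  have cOf : PySem.Str.isIn (String.ofList ['O']) "AOy" = true := by decide
  have cyf : PySem.Str.isIn (String.ofList ['y']) "AOy" = true := by decide
  have caf : PySem.Str.isIn (String.ofList ['a']) "AOy" = false := by decide
  have cof : PySem.Str.isIn (String.ofList ['o']) "AOy" = false := by decide
  have cuf : PySem.Str.isIn (String.ofList ['u']) "AOy" = false := by decide
  have cAb : PySem.Str.isIn (String.ofList ['A']) "aou" = false := by decide
  have cOb : PySem.Str.isIn (String.ofList ['O']) "aou" = false := by decide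
  have cyb : PySem.Str.isIn (String.ofList ['y']) "aou" = false := by decide
  have cab : PySem.Str.isIn (String.ofList ['a']) "aou" = true := by decide
  have cob : PySem.Str.isIn (String.ofList ['o']) "aou" = true := by decide
  have cub : PySem.Str.isIn (String.ofList ['u']) "aou" = true := by decide
  rw [cAf, cOf, cyf, caf, cof, cuf, cAb, cOb, cyb, cab, cob, cub]
  rw [anyFront, anyBack]
  by_cases hA : s.toList.contains 'A' = true <;>
    by_cases hO : s.toList.contains 'O' = true <;>
      by_cases hy : s.toList.contains 'y' = true <;>
        by_cases ha : s.toList.contains 'a' = true <;>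
          by_cases ho : s.toList.contains 'o' = true <;>
            by_cases hu : s.toList.contains 'u' = true <;>
              simp_all
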